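-- pv_equiv track=rewrite | github.com/samc5/BUDining | app/api/data/scraper.py | sort_important_items
-- ===== SOURCE A (Python) =====
-- def sort_important_items(sorted_menu): #clean the results of a sort_items_by_station call by removing all items from the salad bar, bakery, and deli, but leaving their station names as empty keys in the dictionary
--     ans = {}
--     for i in sorted_menu:
--         if i != 'Salad Bar' and i != 'Bakery' and i != 'Deli' and i != 'Home Zone' and i != 'Fiesta' and i != 'Hot Breakfast Cereals':
--             ans[i] = sorted_menu[i]
--         else:
--             ans[i] = []
--     return ans
-- ===== SOURCE B (Python) =====
-- def sort_important_items(sorted_menu):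
--     ans = dict(sorted_menu)
--     for name in ('Salad Bar', 'Bakery', 'Deli', 'Home Zone', 'Fiesta', 'Hot Breakfast Cereals'):
--         if name in ans:
--             ans[name] = []
--     return ans
-- ===== Notes on version B (the rewrite author's own statement) =====
-- stated objective: simpler
-- what changed: Instead of rebuilding the dict key by key with a six-way branch on every key, B shallow-copies the whole dict once and then runs a fixed six-element correction pass that blanks the station keys that are present; Pre_ excludes association lists with duplicate keys, which do not represent any Python dict.
import Mathlib
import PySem

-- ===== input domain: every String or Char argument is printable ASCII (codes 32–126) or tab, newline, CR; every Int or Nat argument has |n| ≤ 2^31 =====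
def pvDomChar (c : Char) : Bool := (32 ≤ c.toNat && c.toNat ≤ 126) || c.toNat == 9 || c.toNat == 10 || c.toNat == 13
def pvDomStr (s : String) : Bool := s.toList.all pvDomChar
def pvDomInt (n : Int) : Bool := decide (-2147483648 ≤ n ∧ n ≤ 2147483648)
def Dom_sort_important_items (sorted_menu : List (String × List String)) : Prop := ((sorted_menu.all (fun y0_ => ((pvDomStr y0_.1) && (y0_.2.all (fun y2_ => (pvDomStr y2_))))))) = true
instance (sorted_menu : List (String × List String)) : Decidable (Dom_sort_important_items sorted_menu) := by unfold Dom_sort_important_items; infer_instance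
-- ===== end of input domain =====

-- B shallow-copies the whole dict once and blanks the six station keys that are present,
-- instead of rebuilding the dict key by key with a six-way branch on every key (objective: simpler).

-- ===== PORT A =====
-- literal port of A: build a fresh dict, copying each key's value unless it is one of six stations
def sort_important_items (sorted_menu : List (String × List String)) : List (String × List String) :=
  (sorted_menu.foldl
    (fun ans i =>
      if i.1 != "Salad Bar" && i.1 != "Bakery" && i.1 != "Deli" && i.1 != "Home Zone" &&
         i.1 != "Fiesta" && i.1 != "Hot Breakfast Cereals" then
        ans.insert i.1 ((PySem.Dict.mk sorted_menu).getD i.1 [])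
      else
        ans.insert i.1 ([] : List String))
    (PySem.Dict.empty : PySem.Dict String (List String))).items

-- ===== PORT B =====
-- the fixed tuple of station names Source B iterates over
def pvStations : List String :=
  ["Salad Bar", "Bakery", "Deli", "Home Zone", "Fiesta", "Hot Breakfast Cereals"]

def sort_important_items_alt (sorted_menu : List (String × List String)) : List (String × List String) :=
  (pvStations.foldl
    (fun ans name => if ans.contains name then ans.insert name ([] : List String) else ans)
    (PySem.Dict.mk sorted_menu : PySem.Dict String (List String))).items

-- ===== PRECONDITION & SPEC =====
-- Pre_ excludes association lists with duplicate keys: those do not represent any Python dict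
-- (the Python parameter is a dict, whose keys are necessarily distinct).
def Pre_sort_important_items (sorted_menu : List (String × List String)) : Prop :=
  (sorted_menu.map Prod.fst).Nodup
instance (sorted_menu : List (String × List String)) : Decidable (Pre_sort_important_items sorted_menu) := by unfold Pre_sort_important_items; infer_instance

def pvWitness_sort_important_items : (List (String × List String)) :=
  [("Salad Bar", ["kale", "tomato"]), ("Pizza", ["cheese"]), ("Deli", ["ham"])]

def Spec_sort_important_items (sorted_menu : List (String × List String)) (out : List (String × List String)) : Prop := out = sort_important_items_alt sorted_menu
instance (sorted_menu : List (String × List String)) (out : List (String × List String)) : Decidable (Spec_sort_important_items sorted_menu out) := by unfold Spec_sort_important_items; infer_instance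

-- ===== CLAIM (what is proved, stated in full; the proofs are below) =====
def Claim_equal_sort_important_items : Prop := ∀ (sorted_menu : List (String × List String)), Dom_sort_important_items sorted_menu → Pre_sort_important_items sorted_menu → Spec_sort_important_items sorted_menu (sort_important_items sorted_menu)

-- ===== LEMMAS AND PROOFS =====

-- the common normal form both folds reach: keep the pair, blanking station values
def pvNorm (p : String × List String) : String × List String :=
  if p.1 ∈ pvStations then (p.1, []) else p

-- per-pair value A's branch computes
def pvAval (sorted_menu : List (String × List String)) (i : String × List String) : List String :=
  if i.1 != "Salad Bar" && i.1 != "Bakery" && i.1 != "Deli" && i.1 != "Home Zone" &&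
     i.1 != "Fiesta" && i.1 != "Hot Breakfast Cereals" then
    (PySem.Dict.mk sorted_menu).getD i.1 [] else []

-- A's fold: under distinct keys every insert is fresh, so the items are a map over the input
theorem portA_eq_map (sorted_menu : List (String × List String))
    (hnd : (sorted_menu.map Prod.fst).Nodup) :
    sort_important_items sorted_menu = sorted_menu.map pvNorm := by
  unfold sort_important_items
  have hbody : (fun (ans : PySem.Dict String (List String)) (i : String × List String) =>
      if i.1 != "Salad Bar" && i.1 != "Bakery" && i.1 != "Deli" && i.1 != "Home Zone" &&
         i.1 != "Fiesta" && i.1 != "Hot Breakfast Cereals" then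
        ans.insert i.1 ((PySem.Dict.mk sorted_menu).getD i.1 [])
      else ans.insert i.1 ([] : List String))
      = fun ans i => ans.insert i.1 (pvAval sorted_menu i) := by
    funext ans i
    unfold pvAval
    split <;> rfl
  rw [hbody,
    PySem.Dict.items_foldl_insert_fresh sorted_menu Prod.fst (pvAval sorted_menu)
      PySem.Dict.empty (fun a _ => PySem.Dict.contains_empty a.1) hnd]
  simp only [show (PySem.Dict.empty : PySem.Dict String (List String)).items = [] from rfl,
    List.nil_append]
  apply List.map_congr_left
  intro p hp
  have hget : (PySem.Dict.mk sorted_menu).getD p.1 [] = p.2 := by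
    apply PySem.Dict.getD_of_mem_items (PySem.Dict.mk sorted_menu)
      (by simpa using hp)
    simpa [PySem.Dict.keys_mk] using hnd
  unfold pvAval pvNorm
  by_cases hmem : p.1 ∈ pvStations
  · have : ¬(p.1 != "Salad Bar" && p.1 != "Bakery" && p.1 != "Deli" && p.1 != "Home Zone" &&
        p.1 != "Fiesta" && p.1 != "Hot Breakfast Cereals") = true := by
      simp only [pvStations, List.mem_cons, List.not_mem_nil, or_false] at hmem
      simp [bne_iff_ne]
      rcases hmem with h|h|h|h|h|h <;> simp [h]
    simp [this, hmem]
  · have hc : (p.1 != "Salad Bar" && p.1 != "Bakery" && p.1 != "Deli" && p.1 != "Home Zone" &&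
        p.1 != "Fiesta" && p.1 != "Hot Breakfast Cereals") = true := by
      simp only [pvStations, List.mem_cons, List.not_mem_nil, or_false, not_or] at hmem
      simp [bne_iff_ne]
      tauto
    simp [hc, hmem, hget]

-- one pass of B's correction loop, expressed on the items list
theorem blank_items (ns : List String) (d : PySem.Dict String (List String)) :
    (ns.foldl (fun ans name => if ans.contains name then ans.insert name ([] : List String) else ans) d).items
      = d.items.map (fun p => ns.foldl (fun q n => if q.1 == n then (n, ([] : List String)) else q) p) := by
  induction ns generalizing d with
  | nil => simp
  | cons n ns ih =>
    simp only [List.foldl_cons]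
    rw [ih]
    have hstep : (if d.contains n then d.insert n ([] : List String) else d).items
        = d.items.map (fun p => if p.1 == n then (n, ([] : List String)) else p) := by
      by_cases h : d.contains n
      · simp [h, PySem.Dict.items_insert_of_contains d ([] : List String) h]
      · rw [if_neg h]
        have hid : ∀ p ∈ d.items,
            (if (p.1 == n) = true then (n, ([] : List String)) else p) = id p := by
          intro p hp
          have hne : p.1 ≠ n := by
            intro he
            have hk : n ∈ d.keys := by
              simp only [PySem.Dict.keys]
              exact he ▸ List.mem_map_of_mem hp
            exact absurd ((PySem.Dict.contains_iff_mem_keys d n).mpr hk) (by simp [h])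
          simp [hne]
        rw [List.map_congr_left hid, List.map_id]
    rw [hstep, List.map_map]
    rfl

-- B's fold: blanking the present station keys maps the items pointwise
theorem portB_eq_map (sorted_menu : List (String × List String)) :
    sort_important_items_alt sorted_menu = sorted_menu.map
      (fun p => pvStations.foldl (fun q n => if q.1 == n then (n, ([] : List String)) else q) p) := by
  unfold sort_important_items_alt
  rw [blank_items]

-- ===== VERDICT (by name: the statement is the Claim_ definition above) =====
theorem sort_important_items_spec : Claim_equal_sort_important_items := by
  intro m _ hpre
  unfold Spec_sort_important_items
  rw [portA_eq_map m hpre, portB_eq_map m]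
  apply List.map_congr_left
  intro p _
  rcases p with ⟨k, v⟩
  simp only [pvNorm, pvStations, List.foldl_cons, List.foldl_nil, List.mem_cons,
    List.not_mem_nil, or_false]
  by_cases h1 : k = "Salad Bar" <;> by_cases h2 : k = "Bakery" <;> by_cases h3 : k = "Deli" <;>
    by_cases h4 : k = "Home Zone" <;> by_cases h5 : k = "Fiesta" <;>
    by_cases h6 : k = "Hot Breakfast Cereals" <;>
    simp_all
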